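-- pv_equiv track=rewrite | github.com/minseok0809/text-line-converter | text_line_converter.py | get_one_line
-- ===== SOURCE A (Python) =====
-- def get_one_line(text):
--
--     one_line = ""
--     words = text.replace("\n", " ")
--     words = words.replace("\r", " ")
--
--     if type(words) == list:
--         for word in words:
--             one_line += word
--
--     elif type(words) != list:
--         one_line = words
--
--     one_line = ' '.join(one_line.split())
--     one_line = one_line.strip()
--
--     return one_line
-- ===== SOURCE B (Python) =====
-- def get_one_line(text):
--     out = []
--     pending = False
--     for ch in text:
--         if ch.isspace():
--             if out:
--                 pending = True
--         else:
--             if pending: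
--                 out.append(' ')
--                 pending = False
--             out.append(ch)
--     return ''.join(out)
-- ===== Notes on version B (the rewrite author's own statement) =====
-- stated objective: faster
-- what changed: Replaced A's replace/split/join/strip pipeline (several intermediate strings and passes) with one single-pass character state machine that emits words separated by single spaces directly.
import Mathlib
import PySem

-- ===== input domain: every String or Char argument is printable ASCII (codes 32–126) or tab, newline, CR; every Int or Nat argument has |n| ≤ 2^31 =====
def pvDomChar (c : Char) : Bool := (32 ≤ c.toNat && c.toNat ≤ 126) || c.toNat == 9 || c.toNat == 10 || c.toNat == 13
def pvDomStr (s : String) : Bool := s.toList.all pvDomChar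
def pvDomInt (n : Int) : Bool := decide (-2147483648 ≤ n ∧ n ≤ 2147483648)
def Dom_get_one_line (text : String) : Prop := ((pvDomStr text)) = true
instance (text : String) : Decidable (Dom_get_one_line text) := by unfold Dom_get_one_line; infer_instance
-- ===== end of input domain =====

-- B replaces A's replace/split/join/strip pipeline with a single-pass character
-- state machine (one traversal, no intermediate strings).


-- ===== PORT A =====
-- literal port of A; `words` is always a str, so the `type(words) == list`
-- branch never runs and the executed `elif` branch is `one_line = words`.
def get_one_line (text : String) : String :=
  let words := PySem.Str.replace text "\n" " "
  let words := PySem.Str.replace words "\r" " "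
  let one_line := words
  let one_line := PySem.Str.join " " (PySem.Str.split₀ one_line)
  let one_line := PySem.Str.strip one_line
  one_line

-- ===== PORT B =====
-- one step of B's loop: state = (collected chars, pending-separator flag)
def get_one_line_step (st : List Char × Bool) (ch : Char) : List Char × Bool :=
  if PySem.Chars.isspace ch then
    (st.1, if st.1.isEmpty then st.2 else true)
  else
    ((if st.2 then st.1 ++ [' '] else st.1) ++ [ch], false)

def get_one_line_alt (text : String) : String :=
  String.ofList (text.toList.foldl get_one_line_step ([], false)).1

-- ===== PRECONDITION & SPEC =====
def Spec_get_one_line (text : String) (out : String) : Prop := out = get_one_line_alt text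
instance (text : String) (out : String) : Decidable (Spec_get_one_line text out) := by unfold Spec_get_one_line; infer_instance

-- ===== CLAIM (what is proved, stated in full; the proofs are below) =====
def Claim_equal_get_one_line : Prop := ∀ (text : String), Dom_get_one_line text → Spec_get_one_line text (get_one_line text)

-- ===== LEMMAS AND PROOFS =====

-- words recorded by split₀.go's state (completed words reversed, current word reversed)
def pvWords (acc : List (List Char)) (cur : List Char) : List (List Char) :=
  acc.reverse ++ (if cur = [] then [] else [cur.reverse])

def pvGood (ws : List (List Char)) : Prop :=
  ∀ w ∈ ws, w ≠ [] ∧ ∀ c ∈ w, PySem.Chars.isspace c = false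

theorem pv_intercalate_nil (sp : List Char) : List.intercalate sp [] = [] := by
  simp [List.intercalate]

theorem pv_intercalate_singleton (sp w : List Char) : List.intercalate sp [w] = w := by
  simp [List.intercalate]

theorem pv_intercalate_cons_cons (sp a b : List Char) (t : List (List Char)) :
    List.intercalate sp (a :: b :: t) = a ++ sp ++ List.intercalate sp (b :: t) := by
  simp [List.intercalate, List.intersperse]

-- replace with one-char old/new is a character map
theorem pv_replace_go_single (o n : Char) :
    ∀ (l : List Char) (fuel : Nat) (acc : List Char), l.length ≤ fuel →
      PySem.Chars.replace.go [o] [n] fuel l acc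
        = acc.reverse ++ l.map (fun c => if c = o then n else c) := by
  intro l
  induction l with
  | nil => intro fuel acc _; cases fuel <;> simp [PySem.Chars.replace.go]
  | cons c t ih =>
    intro fuel acc hf
    cases fuel with
    | zero => simp at hf
    | succ fuel =>
      have hf' : t.length ≤ fuel := by simpa using hf
      by_cases h : c = o
      · subst h
        have hpre : List.isPrefixOf [c] (c :: t) = true := by simp [List.isPrefixOf]
        simp only [PySem.Chars.replace.go, hpre, if_true]
        have hd : List.drop [c].length (c :: t) = t := by simp
        rw [hd]
        rw [ih fuel ([n].reverse ++ acc) hf']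
        simp
      · have hpre : List.isPrefixOf [o] (c :: t) = false := by
          simp [List.isPrefixOf]
          intro hh; exact absurd hh.symm h
        simp only [PySem.Chars.replace.go, hpre, Bool.false_eq_true, if_false]
        rw [ih fuel (c :: acc) hf']
        simp [h]

theorem pv_replace_single (o n : Char) (l : List Char) :
    PySem.Chars.replace l [o] [n] = l.map (fun c => if c = o then n else c) := by
  simp [PySem.Chars.replace, pv_replace_go_single o n l l.length [] (le_refl _)]

-- split₀ is unchanged by a map that preserves isspace and fixes non-space chars
theorem pv_split_go_map (f : Char → Char)
    (hsp : ∀ c, PySem.Chars.isspace (f c) = PySem.Chars.isspace c)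
    (hfix : ∀ c, PySem.Chars.isspace c = false → f c = c) :
    ∀ (s : List Char) (cur : List Char) (acc : List (List Char)),
      PySem.Chars.split₀.go (s.map f) cur acc = PySem.Chars.split₀.go s cur acc := by
  intro s
  induction s with
  | nil => intro cur acc; simp
  | cons c t ih =>
    intro cur acc
    simp only [List.map_cons, PySem.Chars.split₀.go, hsp c]
    by_cases h : PySem.Chars.isspace c = true
    · rw [if_pos h, if_pos h]
      by_cases hc : cur.isEmpty = true <;> simp [hc, ih]
    · have h' : PySem.Chars.isspace c = false := by simpa using h
      rw [if_neg h, if_neg h, hfix c h', ih]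

-- intercalate: appending one word after a nonempty word list
theorem pv_intercalate_snoc (sp w : List Char) :
    ∀ ws : List (List Char), ws ≠ [] →
      List.intercalate sp (ws ++ [w]) = List.intercalate sp ws ++ sp ++ w := by
  intro ws
  induction ws with
  | nil => intro h; exact absurd rfl h
  | cons a t ih =>
    intro _
    cases t with
    | nil => simp [pv_intercalate_cons_cons, pv_intercalate_singleton]
    | cons b t' =>
      have h2 := ih (List.cons_ne_nil b t')
      rw [List.cons_append] at h2
      rw [List.cons_append, List.cons_append, pv_intercalate_cons_cons, h2,
        pv_intercalate_cons_cons]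
      simp [List.append_assoc]

theorem pv_intercalate_snoc_char (sp w : List Char) (c : Char) (ws : List (List Char)) :
    List.intercalate sp (ws ++ [w]) ++ [c] = List.intercalate sp (ws ++ [w ++ [c]]) := by
  cases ws with
  | nil => simp [pv_intercalate_singleton]
  | cons a t =>
    rw [pv_intercalate_snoc sp w _ (by simp), pv_intercalate_snoc sp (w ++ [c]) _ (by simp)]
    simp [List.append_assoc]

theorem pv_intercalate_ne_nil (sp : List Char) (ws : List (List Char))
    (hne : ws ≠ []) (hw : ∀ w ∈ ws, w ≠ []) : List.intercalate sp ws ≠ [] := by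
  cases ws with
  | nil => exact absurd rfl hne
  | cons a t =>
    cases t with
    | nil => simpa [pv_intercalate_singleton] using hw a (by simp)
    | cons b t' =>
      rw [pv_intercalate_cons_cons]
      intro h
      have ha := hw a (by simp)
      exact ha (List.append_eq_nil_iff.mp (List.append_eq_nil_iff.mp h).1).1

-- pvWords bookkeeping
theorem pv_words_flush (acc : List (List Char)) (cur : List Char) :
    pvWords (if cur = [] then acc else cur.reverse :: acc) [] = pvWords acc cur := by
  by_cases h : cur = [] <;> simp [pvWords, h]

-- main invariant: B's fold computes the ' '-intercalation of split₀.go's words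
theorem pv_fold_invariant :
    ∀ (s : List Char) (cur : List Char) (acc : List (List Char)) (pnd : Bool),
      pvGood (pvWords acc cur) →
      pnd = decide (cur = [] ∧ acc ≠ []) →
      (s.foldl get_one_line_step (List.intercalate [' '] (pvWords acc cur), pnd)).1
        = List.intercalate [' '] (PySem.Chars.split₀.go s cur acc) := by
  intro s
  induction s with
  | nil =>
    intro cur acc pnd _ _
    simp only [List.foldl_nil, PySem.Chars.split₀.go]
    by_cases h : cur = []
    · rw [if_pos (by simpa [List.isEmpty_iff] using h)]
      simp [pvWords, h]
    · rw [if_neg (by simpa [List.isEmpty_iff] using h)]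
      simp [pvWords, h]
  | cons c t ih =>
    intro cur acc pnd hgood hpnd
    simp only [List.foldl_cons]
    by_cases hc : PySem.Chars.isspace c = true
    · -- whitespace: flush cur (if nonempty) into acc, maybe set pending
      simp only [get_one_line_step, hc, if_true]
      have hstep : PySem.Chars.split₀.go (c :: t) cur acc
          = PySem.Chars.split₀.go t [] (if cur = [] then acc else cur.reverse :: acc) := by
        by_cases h : cur = [] <;>
          simp [PySem.Chars.split₀.go, hc, h, List.isEmpty_iff]
      rw [hstep]
      have hg' : pvGood (pvWords (if cur = [] then acc else cur.reverse :: acc) []) := by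
        rw [pv_words_flush]; exact hgood
      have hpnd' : (if (List.intercalate [' '] (pvWords acc cur)).isEmpty then pnd else true)
          = decide (([] : List Char) = [] ∧ (if cur = [] then acc else cur.reverse :: acc) ≠ []) := by
        by_cases h : cur = []
        · subst h
          by_cases ha : acc = []
          · subst ha
            simp [pvWords, pv_intercalate_nil, hpnd]
          · have hne : List.intercalate [' '] (pvWords acc ([] : List Char)) ≠ [] := by
              apply pv_intercalate_ne_nil _ _ (by simp [pvWords, ha])
              intro w hw; exact (hgood w hw).1
            simp [List.isEmpty_iff, hne, ha]
        · have hne : List.intercalate [' '] (pvWords acc cur) ≠ [] := by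
            apply pv_intercalate_ne_nil _ _ (by simp [pvWords, h])
            intro w hw; exact (hgood w hw).1
          simp [List.isEmpty_iff, hne, h]
      have := ih [] (if cur = [] then acc else cur.reverse :: acc)
        (if (List.intercalate [' '] (pvWords acc cur)).isEmpty then pnd else true) hg' hpnd'
      rwa [pv_words_flush] at this
    · -- non-space: extend the current word
      have hc' : PySem.Chars.isspace c = false := by simpa using hc
      simp only [get_one_line_step, hc', Bool.false_eq_true, if_false]
      have hstep : PySem.Chars.split₀.go (c :: t) cur acc
          = PySem.Chars.split₀.go t (c :: cur) acc := by
        simp [PySem.Chars.split₀.go, hc']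
      rw [hstep]
      have hgood' : pvGood (pvWords acc (c :: cur)) := by
        intro w hw
        simp only [pvWords, List.mem_append] at hw
        rcases hw with hw | hw
        · exact hgood w (by simp [pvWords, hw])
        · simp at hw
          subst hw
          refine ⟨by simp, ?_⟩
          intro x hx
          simp at hx
          rcases hx with hx | hx
          · by_cases h : cur = []
            · simp [h] at hx
            · have := hgood cur.reverse (by simp [pvWords, h])
              exact this.2 x (by simpa using hx)
          · subst hx; exact hc'
      have hs : (if pnd then List.intercalate [' '] (pvWords acc cur) ++ [' ']
            else List.intercalate [' '] (pvWords acc cur)) ++ [c]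
          = List.intercalate [' '] (pvWords acc (c :: cur)) := by
        by_cases h : cur = []
        · subst h
          by_cases ha : acc = []
          · subst ha
            have : pnd = false := by simpa using hpnd
            subst this
            simp [pvWords, pv_intercalate_nil, pv_intercalate_singleton]
          · have hpt : pnd = true := by simpa [ha] using hpnd
            subst hpt
            have hsn := pv_intercalate_snoc [' '] [c] acc.reverse (by simpa using ha)
            simp [pvWords, hsn, List.append_assoc]
        · have : pnd = false := by simpa [h] using hpnd
          subst this
          simp only [Bool.false_eq_true, if_false, pvWords, List.reverse_cons]
          rw [if_neg h, if_neg (by simp)]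
          exact pv_intercalate_snoc_char [' '] cur.reverse c acc.reverse
      rw [hs]
      exact ih (c :: cur) acc false hgood' (by simp)

-- words produced by split₀.go are nonempty and all-non-space
theorem pv_split_go_good :
    ∀ (s cur : List Char) (acc : List (List Char)),
      pvGood (pvWords acc cur) →
      (∀ c ∈ cur, PySem.Chars.isspace c = false) →
      pvGood (PySem.Chars.split₀.go s cur acc) := by
  intro s
  induction s with
  | nil =>
    intro cur acc hg _
    simp only [PySem.Chars.split₀.go]
    by_cases h : cur = []
    · rw [if_pos (by simpa [List.isEmpty_iff] using h)]
      intro w hw; exact hg w (by simp [pvWords, h, hw])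
    · rw [if_neg (by simpa [List.isEmpty_iff] using h)]
      intro w hw
      apply hg w
      simp only [List.reverse_cons, List.mem_append] at hw
      simp only [pvWords, if_neg h, List.mem_append]
      simpa using hw
  | cons c t ih =>
    intro cur acc hg hcur
    simp only [PySem.Chars.split₀.go]
    by_cases hc : PySem.Chars.isspace c = true
    · rw [if_pos hc]
      by_cases h : cur = []
      · subst h
        rw [if_pos (by simp)]
        exact ih [] acc hg (by simp)
      · rw [if_neg (by simpa [List.isEmpty_iff] using h)]
        apply ih [] (cur.reverse :: acc)
        · have := pv_words_flush acc cur
          rw [if_neg h] at this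
          rw [this]; exact hg
        · simp
    · rw [if_neg hc]
      have hc' : PySem.Chars.isspace c = false := by simpa using hc
      apply ih (c :: cur) acc
      · intro w hw
        simp only [pvWords, List.mem_append] at hw
        rcases hw with hw | hw
        · exact hg w (by simp [pvWords, hw])
        · simp at hw; subst hw
          refine ⟨by simp, ?_⟩
          intro x hx
          simp at hx
          rcases hx with hx | hx
          · exact hcur x (by simpa using hx)
          · subst hx; exact hc'
      · intro x hx
        simp at hx
        rcases hx with hx | hx
        · subst hx; exact hc'
        · exact hcur x hx

-- dropWhile is the identity when the first element fails the test (or the list is empty)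
theorem pv_dropWhile_id (p : Char → Bool) (xs : List Char)
    (h : xs = [] ∨ ∃ a t, xs = a :: t ∧ p a = false) :
    xs.dropWhile p = xs := by
  rcases h with h | ⟨a, t, rfl, ha⟩
  · simp [h]
  · simp [List.dropWhile, ha]

-- reverse of an intercalation with a one-char separator
theorem pv_reverse_intercalate (sp : Char) :
    ∀ ws : List (List Char),
      (List.intercalate [sp] ws).reverse
        = List.intercalate [sp] ((ws.map List.reverse).reverse) := by
  intro ws
  induction ws with
  | nil => simp [pv_intercalate_nil]
  | cons a t ih =>
    cases t with
    | nil => simp [pv_intercalate_singleton]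
    | cons b t' =>
      have hsn := pv_intercalate_snoc [sp] a.reverse ((List.map List.reverse (b :: t')).reverse) (by simp)
      calc (List.intercalate [sp] (a :: b :: t')).reverse
          = (List.intercalate [sp] (b :: t')).reverse ++ [sp] ++ a.reverse := by
            rw [pv_intercalate_cons_cons]; simp [List.append_assoc]
        _ = List.intercalate [sp] ((List.map List.reverse (b :: t')).reverse) ++ [sp] ++ a.reverse := by
            rw [ih]
        _ = List.intercalate [sp] ((List.map List.reverse (b :: t')).reverse ++ [a.reverse]) := by
            rw [hsn]
        _ = List.intercalate [sp] ((List.map List.reverse (a :: b :: t')).reverse) := by simp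

-- lstrip fixes an intercalation of nonempty non-space words
theorem pv_lstrip_intercalate (ws : List (List Char)) (h : pvGood ws) :
    PySem.Chars.lstrip (List.intercalate [' '] ws) = List.intercalate [' '] ws := by
  unfold PySem.Chars.lstrip
  apply pv_dropWhile_id
  cases ws with
  | nil => left; simp [pv_intercalate_nil]
  | cons a t =>
    right
    obtain ⟨hne, hsp⟩ := h a (by simp)
    obtain ⟨d, a', rfl⟩ := List.exists_cons_of_ne_nil hne
    cases t with
    | nil => exact ⟨d, a', by simp [pv_intercalate_singleton], hsp d (by simp)⟩
    | cons b t' =>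
      exact ⟨d, a' ++ [' '] ++ List.intercalate [' '] (b :: t'),
        by simp [pv_intercalate_cons_cons], hsp d (by simp)⟩

theorem pv_strip_intercalate (ws : List (List Char)) (h : pvGood ws) :
    PySem.Chars.strip (List.intercalate [' '] ws) = List.intercalate [' '] ws := by
  have hrevgood : pvGood ((ws.map List.reverse).reverse) := by
    intro w hw
    simp only [List.mem_reverse, List.mem_map] at hw
    obtain ⟨w', hw', rfl⟩ := hw
    obtain ⟨hne, hsp⟩ := h w' hw'
    exact ⟨by simpa using hne, fun c hc => hsp c (by simpa using hc)⟩
  unfold PySem.Chars.strip PySem.Chars.rstrip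
  rw [pv_lstrip_intercalate ws h]
  rw [pv_reverse_intercalate ' ' ws]
  have h2 := pv_lstrip_intercalate _ hrevgood
  unfold PySem.Chars.lstrip at h2
  rw [h2, ← pv_reverse_intercalate ' ' ws, List.reverse_reverse]

-- the list-level statement: A's pipeline equals B's state machine on any char list
theorem pv_main (cs : List Char) :
    PySem.Chars.strip (PySem.Chars.join [' '] (PySem.Chars.split₀ cs))
      = (cs.foldl get_one_line_step ([], false)).1 := by
  have hgood0 : pvGood (pvWords [] []) := by
    intro w hw; simp [pvWords] at hw
  have hgood : pvGood (PySem.Chars.split₀ cs) :=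
    pv_split_go_good cs [] [] hgood0 (by simp)
  have hfold := pv_fold_invariant cs [] [] false hgood0 (by simp)
  have hstart : List.intercalate [' '] (pvWords [] ([] : List Char)) = ([] : List Char) := by
    simp [pvWords, pv_intercalate_nil]
  rw [hstart] at hfold
  show PySem.Chars.strip (List.intercalate [' '] (PySem.Chars.split₀ cs)) = _
  rw [pv_strip_intercalate _ hgood]
  rw [show PySem.Chars.split₀ cs = PySem.Chars.split₀.go cs [] [] from rfl]
  exact hfold.symm

theorem pv_isspace_map (o : Char) (ho : PySem.Chars.isspace o = true) :
    (∀ c, PySem.Chars.isspace (if c = o then ' ' else c) = PySem.Chars.isspace c) ∧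
    (∀ c, PySem.Chars.isspace c = false → (if c = o then ' ' else c) = c) := by
  constructor
  · intro c
    by_cases h : c = o
    · subst h; simp [ho]; decide
    · simp [h]
  · intro c hc
    by_cases h : c = o
    · subst h; rw [ho] at hc; exact absurd hc (by simp)
    · simp [h]

-- ===== VERDICT (by name: the statement is the Claim_ definition above) =====
set_option maxHeartbeats 1000000 in
theorem get_one_line_spec : Claim_equal_get_one_line := by
  intro text _
  show get_one_line text = get_one_line_alt text
  unfold get_one_line get_one_line_alt
  have hn : ("\n" : String).toList = ['\n'] := by rfl
  have hr : ("\r" : String).toList = ['\r'] := by rfl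
  have hsp : (" " : String).toList = [' '] := by rfl
  have hmapid : ∀ l : List (List Char), List.map (String.toList ∘ String.ofList) l = l := by
    intro l
    induction l with
    | nil => rfl
    | cons a t iht => simp [iht]
  simp only [PySem.Str.replace, PySem.Str.strip, PySem.Str.join, PySem.Str.split₀,
    String.toList_ofList, List.map_map, hn, hr, hsp]
  congr 1
  have hmap := hmapid
      (PySem.Chars.split₀ (PySem.Chars.replace (PySem.Chars.replace text.toList ['\n'] [' ']) ['\r'] [' ']))
  rw [hmap]
  rw [pv_replace_single '\n' ' ' text.toList, pv_replace_single '\r' ' ']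
  have h1 := pv_isspace_map '\n' (by decide)
  have h2 := pv_isspace_map '\r' (by decide)
  have hsplit : PySem.Chars.split₀
      ((text.toList.map (fun c => if c = '\n' then ' ' else c)).map (fun c => if c = '\r' then ' ' else c))
      = PySem.Chars.split₀ text.toList := by
    show PySem.Chars.split₀.go _ [] [] = PySem.Chars.split₀.go _ [] []
    rw [pv_split_go_map _ h2.1 h2.2, pv_split_go_map _ h1.1 h1.2]
  rw [hsplit]
  exact pv_main text.toList
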